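-- pv_equiv track=rewrite | github.com/SanyaShilov/ProjectEuler | old_python/problem297.py | Zeckendorf
-- ===== SOURCE A (Python) =====
-- def Zeckendorf (n):
--     if n < 5:
--         return n-1
--     F = [1, 2]
--     while F[-1] < n:
--         F.append(F[-1]+F[-2])
--     S = [1, 1, 3]
--     for i in range(len(F)-4):
--         S.append(S[-1]+S[-2]+F[i])
--     if F[-1] == n:
--         return sum(S)
--     r = n - F[-2]
--     return sum(S[:-1])+r+Zeckendorf(r)
-- ===== SOURCE B (Python) =====
-- def Zeckendorf(n):
--     total = 0
--     while n >= 5: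
--         F = [1, 2]
--         S = [1, 1, 3]
--         while F[-1] < n:
--             F.append(F[-1] + F[-2])
--             if len(F) >= 5:
--                 S.append(S[-1] + S[-2] + F[-5])
--         if F[-1] == n:
--             return total + sum(S)
--         total += sum(S[:-1]) + n - F[-2]
--         n -= F[-2]
--     return total + n - 1
-- ===== Notes on version B (the rewrite author's own statement) =====
-- stated objective: alternative
-- what changed: Replaces the tail recursion with an explicit while loop carrying an accumulator `total`, and fuses the two list-building passes (Fibonacci F, then S over range(len(F)-4)) into one combined loop that appends to F and S together.
import Mathlib
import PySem

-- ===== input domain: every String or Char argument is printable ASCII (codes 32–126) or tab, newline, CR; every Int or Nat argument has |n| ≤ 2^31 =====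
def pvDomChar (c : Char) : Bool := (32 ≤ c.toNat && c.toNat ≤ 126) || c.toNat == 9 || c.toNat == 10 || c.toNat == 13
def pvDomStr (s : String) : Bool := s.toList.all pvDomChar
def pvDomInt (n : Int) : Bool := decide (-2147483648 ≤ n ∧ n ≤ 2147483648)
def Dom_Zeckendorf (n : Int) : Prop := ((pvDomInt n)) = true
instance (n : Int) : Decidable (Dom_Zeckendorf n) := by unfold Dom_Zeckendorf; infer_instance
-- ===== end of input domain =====

-- B replaces A's tail recursion by a while loop with an accumulator and fuses the two
-- list-building passes (F, then S) into one combined loop; same cost (objective: alternative).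
-- Both ports use fuel (n.toNat-based upper bounds) only as a totality device: the Python
-- loops/recursion always stop well within that many steps (each step strictly shrinks n,
-- resp. strictly grows F's last element by at least 1 towards n).

-- ===== PORT A =====
-- while F[-1] < n: F.append(F[-1]+F[-2]); F's last two elements are carried as a, b
def growF : Nat → List Int → Int → Int → Int → List Int × Int × Int
  | 0, F, a, b, _ => (F, a, b)
  | fuel+1, F, a, b, n =>
    if b < n then growF fuel (F ++ [a + b]) b (a + b) n
    else (F, a, b)

-- one step of 'S.append(S[-1]+S[-2]+F[i])'; S's last two elements carried in the state
def buildSstep (F : List Int) (st : List Int × Int × Int) (i : Nat) : List Int × Int × Int :=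
  let v := st.2.2 + st.2.1 + F.getD i 0
  (st.1 ++ [v], st.2.2, v)

-- S = [1,1,3]; for i in range(len(F)-4): S.append(S[-1]+S[-2]+F[i])
def buildS (F : List Int) : List Int × Int × Int :=
  (List.range (F.length - 4)).foldl (buildSstep F) ([1, 1, 3], 1, 3)

def ZeckA : Nat → Int → Int
  | 0, _ => 0
  | fuel+1, n =>
    if n < 5 then n - 1
    else
      let g := growF (n.toNat + 2) [1, 2] 1 2 n   -- (F, F[-2], F[-1])
      let S := (buildS g.1).1
      if g.2.2 = n then S.sum
      else S.dropLast.sum + (n - g.2.1) + ZeckA fuel (n - g.2.1)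

def Zeckendorf (n : Int) : Int := ZeckA (n.toNat + 1) n

-- ===== PORT B =====
-- the fused inner loop: grow F and, once len(F) >= 5, S alongside; last two of F are a, b,
-- last two of S are s2, s1
def growFS : Nat → List Int → List Int → Int → Int → Int → Int → Int →
    List Int × List Int × Int × Int
  | 0, F, S, a, b, _, _, _ => (F, S, a, b)
  | fuel+1, F, S, a, b, s2, s1, n =>
    if b < n then
      let c := a + b
      let F' := F ++ [c]
      if 5 ≤ F'.length then
        let v := s1 + s2 + F'.getD (F'.length - 5) 0
        growFS fuel F' (S ++ [v]) b c s1 v n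
      else growFS fuel F' S b c s2 s1 n
    else (F, S, a, b)

-- the outer while loop with accumulator total
def ZeckB : Nat → Int → Int → Int
  | 0, _, total => total
  | fuel+1, n, total =>
    if n < 5 then total + n - 1
    else
      let g := growFS (n.toNat + 2) [1, 2] [1, 1, 3] 1 2 1 3 n  -- (F, S, F[-2], F[-1])
      if g.2.2.2 = n then total + g.2.1.sum
      else ZeckB fuel (n - g.2.2.1) (total + g.2.1.dropLast.sum + (n - g.2.2.1))

def Zeckendorf_alt (n : Int) : Int := ZeckB (n.toNat + 1) n 0

-- ===== PRECONDITION & SPEC =====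
def Spec_Zeckendorf (n : Int) (out : Int) : Prop := out = Zeckendorf_alt n
instance (n : Int) (out : Int) : Decidable (Spec_Zeckendorf n out) := by unfold Spec_Zeckendorf; infer_instance

-- ===== CLAIM (what is proved, stated in full; the proofs are below) =====
def Claim_equal_Zeckendorf : Prop := ∀ (n : Int), Dom_Zeckendorf n → Spec_Zeckendorf n (Zeckendorf n)

-- ===== LEMMAS AND PROOFS =====

-- extending F past the used indices does not change a fold of buildSstep
lemma foldl_buildSstep_append (F : List Int) (c : Int) :
    ∀ (l : List Nat) (st : List Int × Int × Int), (∀ i ∈ l, i < F.length) →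
      l.foldl (buildSstep (F ++ [c])) st = l.foldl (buildSstep F) st := by
  intro l
  induction l with
  | nil => intro st h; rfl
  | cons i l ih =>
    intro st h
    have hi : i < F.length := h i (List.mem_cons_self)
    have : buildSstep (F ++ [c]) st i = buildSstep F st i := by
      simp [buildSstep, List.getD, List.getElem?_append_left hi]
    simp only [List.foldl_cons, this]
    exact ih _ (fun j hj => h j (List.mem_cons_of_mem _ hj))

-- how A's S-state evolves when one element is appended to F
lemma buildS_append (F : List Int) (c : Int) :
    buildS (F ++ [c]) =
      if 4 ≤ F.length then buildSstep (F ++ [c]) (buildS F) (F.length - 4)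
      else buildS F := by
  unfold buildS
  by_cases h4 : 4 ≤ F.length
  · have hlen : (F ++ [c]).length - 4 = (F.length - 4) + 1 := by
      simp [List.length_append]; omega
    rw [hlen, List.range_succ, List.foldl_append]
    simp only [List.foldl_cons, List.foldl_nil, if_pos h4]
    rw [foldl_buildSstep_append F c _ _ (fun i hi => by
      have := List.mem_range.mp hi; omega)]
  · have hlen : (F ++ [c]).length - 4 = 0 := by
      simp [List.length_append]; omega
    have hlen' : F.length - 4 = 0 := by omega
    rw [hlen, hlen', if_neg h4]
    rfl

-- the fused loop computes growF's F together with buildS of that F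
lemma growFS_eq_growF (fuel : Nat) :
    ∀ (F : List Int) (a b n : Int), 2 ≤ F.length →
      growFS fuel F (buildS F).1 a b (buildS F).2.1 (buildS F).2.2 n =
        ((growF fuel F a b n).1, (buildS (growF fuel F a b n).1).1,
         (growF fuel F a b n).2.1, (growF fuel F a b n).2.2) := by
  induction fuel with
  | zero =>
    intro F a b n hF
    rfl
  | succ fuel ih =>
    intro F a b n hF
    by_cases hb : b < n
    · have h5 : (5 ≤ (F ++ [a + b]).length) ↔ 4 ≤ F.length := by
        simp only [List.length_append, List.length_cons, List.length_nil]; omega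
      by_cases h4 : 4 ≤ F.length
      · have hS := buildS_append F (a + b)
        rw [if_pos h4] at hS
        have hidx : (F ++ [a + b]).length - 5 = F.length - 4 := by
          simp only [List.length_append, List.length_cons, List.length_nil]; omega
        simp only [growFS, growF, if_pos hb, if_pos (h5.mpr h4)]
        have h2 : 2 ≤ (F ++ [a + b]).length := by simp only [List.length_append, List.length_cons, List.length_nil]; omega
        have := ih (F ++ [a + b]) b (a + b) n h2
        rw [hS] at this
        simp only [buildSstep] at this
        rw [hidx]
        exact this
      · have hS := buildS_append F (a + b)
        rw [if_neg h4] at hS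
        simp only [growFS, growF, if_pos hb, if_neg (fun h => h4 (h5.mp h))]
        have h2 : 2 ≤ (F ++ [a + b]).length := by simp only [List.length_append, List.length_cons, List.length_nil]; omega
        have := ih (F ++ [a + b]) b (a + b) n h2
        rw [hS] at this
        exact this
    · simp [growFS, growF, if_neg hb]

-- the accumulator loop equals total plus A's recursion
lemma ZeckB_eq_ZeckA (fuel : Nat) :
    ∀ (n total : Int), ZeckB fuel n total = total + ZeckA fuel n := by
  induction fuel with
  | zero => intro n total; simp [ZeckB, ZeckA]
  | succ fuel ih =>
    intro n total
    by_cases h5 : n < 5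
    · simp [ZeckB, ZeckA, if_pos h5]; ring
    · have hinit : buildS [1, 2] = ([1, 1, 3], 1, 3) := by simp [buildS]
      have hg := growFS_eq_growF (n.toNat + 2) [1, 2] 1 2 n (by simp)
      rw [hinit] at hg
      simp only [ZeckB, ZeckA, if_neg h5, hg]
      by_cases he : (growF (n.toNat + 2) [1, 2] 1 2 n).2.2 = n
      · simp [if_pos he]
      · simp only [if_neg he, ih]
        ring

-- ===== VERDICT (by name: the statement is the Claim_ definition above) =====
theorem Zeckendorf_spec : Claim_equal_Zeckendorf := by
  intro n _
  unfold Spec_Zeckendorf Zeckendorf Zeckendorf_alt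
  rw [ZeckB_eq_ZeckA]
  ring
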